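-- pv_equiv track=rewrite | github.com/ferencberes/twitter-crawler | python/rg17/evaluate_toplist.py | transform_account_name
-- ===== SOURCE A (Python) =====
-- def transform_account_name(acc_name, remove_digits, remove_under_score, to_lower):
--     result = acc_name
--     if to_lower:
--         result = result.lower()
--     if remove_under_score:
--         result = result.replace("_","")
--     if remove_digits:
--         result = ''.join([i for i in result if not i.isdigit()])
--     return result
-- ===== SOURCE B (Python) =====
-- def transform_account_name(acc_name, remove_digits, remove_under_score, to_lower):
--     kept = []
--     for ch in acc_name:
--         if remove_under_score and ch == '_':
--             continue
--         if remove_digits and ch.isdigit():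
--             continue
--         kept.append(ch.lower() if to_lower else ch)
--     return ''.join(kept)
-- ===== Notes on version B (the rewrite author's own statement) =====
-- stated objective: alternative
-- what changed: Replaces A's three sequential whole-string passes (lower, replace, digit-filter join) by one fused character-by-character traversal that decides per character whether to keep it and how to case it.
import Mathlib
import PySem

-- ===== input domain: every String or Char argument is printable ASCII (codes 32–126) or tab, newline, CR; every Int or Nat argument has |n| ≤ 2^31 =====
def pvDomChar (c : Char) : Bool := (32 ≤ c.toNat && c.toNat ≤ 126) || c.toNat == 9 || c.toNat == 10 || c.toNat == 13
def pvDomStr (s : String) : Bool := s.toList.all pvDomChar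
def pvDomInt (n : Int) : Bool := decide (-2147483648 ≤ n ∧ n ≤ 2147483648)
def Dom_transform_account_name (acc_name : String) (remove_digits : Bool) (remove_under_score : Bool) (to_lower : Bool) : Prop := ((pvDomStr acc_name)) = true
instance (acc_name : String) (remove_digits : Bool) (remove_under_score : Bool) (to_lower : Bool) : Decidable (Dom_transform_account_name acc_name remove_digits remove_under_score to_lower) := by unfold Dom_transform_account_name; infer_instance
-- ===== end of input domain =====

-- B fuses A's three sequential string passes (lower, underscore-replace, digit-filter) into one per-character traversal; same value everywhere (alternative decomposition, no speed claim).
-- ===== PORT A =====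
-- Literal port of A: three sequential passes (lower, replace "_" "", digit-filter join).
-- ''.join([i for i in result if not i.isdigit()]) is ported as String.ofList of the filtered
-- char list (exact: joining single characters with "" is string-of-chars).
def transform_account_name (acc_name : String) (remove_digits : Bool) (remove_under_score : Bool) (to_lower : Bool) : String :=
  let result := acc_name
  let result := if to_lower then PySem.Str.lower result else result
  let result := if remove_under_score then PySem.Str.replace result "_" "" else result
  let result := if remove_digits then String.ofList (result.toList.filter (fun i => !(PySem.Chars.isdigit i))) else result
  result

-- ===== PORT B =====
-- B: one fused pass; per character decide keep/skip and casing.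
def pvKeep (remove_digits : Bool) (remove_under_score : Bool) (to_lower : Bool) (ch : Char) : Option Char :=
  if remove_under_score && (ch == '_') then none
  else if remove_digits && PySem.Chars.isdigit ch then none
  else some (if to_lower then PySem.Chars.lowerChar ch else ch)

def transform_account_name_alt (acc_name : String) (remove_digits : Bool) (remove_under_score : Bool) (to_lower : Bool) : String :=
  let kept := acc_name.toList.foldl (fun acc ch =>
    match pvKeep remove_digits remove_under_score to_lower ch with
    | none => acc
    | some c => acc ++ [c]) []
  String.ofList kept

-- ===== PRECONDITION & SPEC =====
def Spec_transform_account_name (acc_name : String) (remove_digits : Bool) (remove_under_score : Bool) (to_lower : Bool) (out : String) : Prop := out = transform_account_name_alt acc_name remove_digits remove_under_score to_lower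
instance (acc_name : String) (remove_digits : Bool) (remove_under_score : Bool) (to_lower : Bool) (out : String) : Decidable (Spec_transform_account_name acc_name remove_digits remove_under_score to_lower out) := by unfold Spec_transform_account_name; infer_instance

-- ===== CLAIM (what is proved, stated in full; the proofs are below) =====
def Claim_equal_transform_account_name : Prop := ∀ (acc_name : String) (remove_digits : Bool) (remove_under_score : Bool) (to_lower : Bool), Dom_transform_account_name acc_name remove_digits remove_under_score to_lower → Spec_transform_account_name acc_name remove_digits remove_under_score to_lower (transform_account_name acc_name remove_digits remove_under_score to_lower)

-- ===== LEMMAS AND PROOFS =====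

theorem charTn (n : Nat) (h : n < 55296) : (Char.ofNat n).toNat = n := by
  rw [Char.toNat_ofNat, if_pos (Or.inl (by omega))]

theorem charLe (a b : Char) : (a ≤ b) ↔ a.toNat ≤ b.toNat := by
  rw [Char.le_def, UInt32.le_iff_toNat_le]; rfl

-- B's append-fold builds the filterMap of pvKeep.
theorem pvFoldl_filterMap (rd ru tl : Bool) (cs acc : List Char) :
    cs.foldl (fun acc ch =>
      match pvKeep rd ru tl ch with
      | none => acc
      | some c => acc ++ [c]) acc = acc ++ cs.filterMap (pvKeep rd ru tl) := by
  induction cs generalizing acc with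
  | nil => simp
  | cons c t ih =>
    cases h : pvKeep rd ru tl c <;> simp [List.foldl, h, ih]

-- Chars.replace with a one-char pattern and empty replacement is a filter.
theorem pvReplaceGo_single (c : Char) : ∀ (fuel : Nat) (l acc : List Char), l.length ≤ fuel →
    PySem.Chars.replace.go [c] [] fuel l acc = acc.reverse ++ l.filter (fun x => !(x == c)) := by
  intro fuel
  induction fuel with
  | zero => intro l acc h; cases l with
    | nil => simp [PySem.Chars.replace.go]
    | cons a t => simp at h
  | succ n ih =>
    intro l acc h
    cases l with
    | nil => simp [PySem.Chars.replace.go]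
    | cons a t =>
      simp only [PySem.Chars.replace.go, List.isPrefixOf]
      by_cases hc : c = a
      · subst hc
        rw [if_pos (by simp)]
        rw [show List.drop [c].length (c :: t) = t from rfl]
        rw [show ([] : List Char).reverse ++ acc = acc from rfl]
        rw [ih t acc (by simpa using Nat.le_of_succ_le_succ h)]
        simp
      · rw [if_neg (by simp; exact hc)]
        rw [ih t (a :: acc) (by simpa using Nat.le_of_succ_le_succ h)]
        have hc' : ¬ (a = c) := fun hx => hc hx.symm
        simp [hc, hc']

theorem pvReplace_single (c : Char) (l : List Char) :
    PySem.Chars.replace l [c] [] = l.filter (fun x => !(x == c)) := by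
  simpa [PySem.Chars.replace] using pvReplaceGo_single c l.length l [] le_rfl

theorem pvIsdigit_lower (c : Char) : PySem.Chars.isdigit (PySem.Chars.lowerChar c) = PySem.Chars.isdigit c := by
  simp only [PySem.Chars.lowerChar, PySem.Chars.isupper, PySem.Chars.isdigit]
  split_ifs with h
  · simp only [Bool.and_eq_true, decide_eq_true_eq, charLe] at h
    have h9 : ('9' : Char).toNat = 57 := by decide
    have hA : ('A' : Char).toNat = 65 := by decide
    have hZ : ('Z' : Char).toNat = 90 := by decide
    rw [hA] at h; rw [hZ] at h
    have ht : (Char.ofNat (c.toNat + 32)).toNat = c.toNat + 32 := charTn _ (by omega)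
    have l : (decide ((Char.ofNat (c.toNat + 32)) ≤ '9')) = false := by
      simp only [decide_eq_false_iff_not, charLe, ht, h9]; omega
    have r : (decide (c ≤ '9')) = false := by
      simp only [decide_eq_false_iff_not, charLe, h9]; omega
    simp [l, r]
  · rfl

theorem pvLowerChar_underscore (c : Char) : (PySem.Chars.lowerChar c == '_') = (c == '_') := by
  simp only [PySem.Chars.lowerChar, PySem.Chars.isupper]
  split_ifs with h
  · simp only [Bool.and_eq_true, decide_eq_true_eq, charLe] at h
    have hA : ('A' : Char).toNat = 65 := by decide
    have hZ : ('Z' : Char).toNat = 90 := by decide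
    rw [hA] at h; rw [hZ] at h
    have ht : (Char.ofNat (c.toNat + 32)).toNat = c.toNat + 32 := charTn _ (by omega)
    have hu : ('_' : Char).toNat = 95 := by decide
    have l : ¬ (Char.ofNat (c.toNat + 32) = '_') := fun hx => by
      have := congrArg Char.toNat hx; rw [ht, hu] at this; omega
    have r : ¬ (c = '_') := fun hx => by
      have := congrArg Char.toNat hx; rw [hu] at this; omega
    simp [l, r]
  · rfl

-- A's three-pass pipeline, on the list side, equals B's single filterMap.
theorem pvMain (rd ru tl : Bool) (cs : List Char) :
    (let r1 := if tl then PySem.Chars.lower cs else cs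
     let r2 := if ru then r1.filter (fun x => !(x == '_')) else r1
     if rd then r2.filter (fun i => !(PySem.Chars.isdigit i)) else r2)
    = cs.filterMap (pvKeep rd ru tl) := by
  induction cs with
  | nil => cases tl <;> cases ru <;> cases rd <;> simp [PySem.Chars.lower]
  | cons c t ih =>
    cases tl <;> cases ru <;> cases rd <;>
      simp only [PySem.Chars.lower, List.map_cons, List.filter_cons, List.filterMap_cons,
        pvKeep, Bool.true_and, Bool.false_and, if_false] at ih ⊢ <;>
      by_cases h1 : (c == '_') = true <;>
      by_cases h2 : PySem.Chars.isdigit c = true <;>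
      simp_all [PySem.Chars.lower, pvIsdigit_lower, pvLowerChar_underscore]

-- ===== VERDICT (by name: the statement is the Claim_ definition above) =====
theorem transform_account_name_spec : Claim_equal_transform_account_name := by
  intro acc_name rd ru tl _
  unfold Spec_transform_account_name transform_account_name transform_account_name_alt
  simp only []
  apply String.toList_inj.mp
  rw [pvFoldl_filterMap]
  have hrep : ∀ s : String, (PySem.Str.replace s "_" "").toList
      = s.toList.filter (fun x => !(x == '_')) := by
    intro s
    rw [PySem.Str.toList_replace]
    simpa using pvReplace_single '_' s.toList
  rw [List.nil_append, ← pvMain rd ru tl acc_name.toList]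
  simp only [apply_ite String.toList, PySem.Str.toList_lower, hrep, String.toList_ofList]
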